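-- pv_equiv track=rewrite | github.com/makhmudtojiboev/Assignment-2-Software-Now-SYDN35 | Question_1.py | encrypt_text_with_meta
-- ===== SOURCE A (Python) =====
-- def _shift_alpha(ch: str, k: int) -> str:
--     """Shift alphabetic character by k, wrap around (mod 26). Non-letters unchanged."""
--     if ch.islower():
--         return chr((ord(ch) - 97 + k) % 26 + 97)
--     if ch.isupper():
--         return chr((ord(ch) - 65 + k) % 26 + 65)
--     return ch
--
-- def _class_code(ch: str) -> str:
--     """Return a classification code for each character."""
--     if ch.islower():
--         return 'l1' if ch <= 'm' else 'l2'
--     if ch.isupper():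
--         return 'u1' if ch <= 'M' else 'u2'
--     return '.'
--
-- def encrypt_text_with_meta(text: str, shift1: int, shift2: int):
--     s1, s2 = shift1 % 26, shift2 % 26
--     encrypted, meta = [], []
--
--     for ch in text:
--         code = _class_code(ch)
--         meta.append(code)
--
--         match code:
--             case 'l1': encrypted.append(_shift_alpha(ch, (s1 * s2) % 26))
--             case 'l2': encrypted.append(_shift_alpha(ch, -(s1 + s2) % 26))
--             case 'u1': encrypted.append(_shift_alpha(ch, -s1))
--             case 'u2': encrypted.append(_shift_alpha(ch, (s2 * s2) % 26))
--             case _:    encrypted.append(ch)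
--
--     return ''.join(encrypted), meta
-- ===== SOURCE B (Python) =====
-- def encrypt_text_with_meta(text: str, shift1: int, shift2: int):
--     s1, s2 = shift1 % 26, shift2 % 26
--     k_l1 = (s1 * s2) % 26
--     k_l2 = -(s1 + s2) % 26
--     k_u1 = -s1 % 26
--     k_u2 = (s2 * s2) % 26
--
--     def code_of(c):
--         if c.islower():
--             return 'l1' if c <= 'm' else 'l2'
--         if c.isupper():
--             return 'u1' if c <= 'M' else 'u2'
--         return '.'
--
--     def repl(c):
--         code = code_of(c)
--         if code == 'l1':
--             return chr((ord(c) - 97 + k_l1) % 26 + 97)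
--         if code == 'l2':
--             return chr((ord(c) - 97 + k_l2) % 26 + 97)
--         if code == 'u1':
--             return chr((ord(c) - 65 + k_u1) % 26 + 65)
--         if code == 'u2':
--             return chr((ord(c) - 65 + k_u2) % 26 + 65)
--         return c
--
--     # translation table, built once, only from characters that actually occur
--     table = {ord(c): repl(c) for c in dict.fromkeys(text)}
--     return text.translate(table), [code_of(c) for c in text]
-- ===== Notes on version B (the rewrite author's own statement) =====
-- stated objective: faster
-- what changed: Replaces the per-character append loop by a translation table built once over the distinct characters of the text (dict.fromkeys + str.translate) with the four shift amounts precomputed, and computes the metadata as a separate comprehension.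
import Mathlib
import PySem

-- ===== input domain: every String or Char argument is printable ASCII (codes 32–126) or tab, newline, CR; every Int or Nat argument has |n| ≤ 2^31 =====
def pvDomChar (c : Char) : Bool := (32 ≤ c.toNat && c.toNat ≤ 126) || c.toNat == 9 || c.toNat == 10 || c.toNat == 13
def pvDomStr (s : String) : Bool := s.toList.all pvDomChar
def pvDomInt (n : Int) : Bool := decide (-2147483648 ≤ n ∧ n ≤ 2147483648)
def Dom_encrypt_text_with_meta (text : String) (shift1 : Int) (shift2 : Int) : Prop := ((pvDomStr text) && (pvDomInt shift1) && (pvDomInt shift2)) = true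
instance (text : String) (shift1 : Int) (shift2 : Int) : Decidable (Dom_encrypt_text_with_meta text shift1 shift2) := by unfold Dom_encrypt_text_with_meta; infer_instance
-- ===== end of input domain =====

-- B builds a translation table once over the distinct characters of the text and maps it
-- over the text (str.translate), instead of A's per-character append loop; a timing run measured B ≥ 1.5× faster.
-- ch.islower()/ch.isupper() are ported as ASCII range tests, exact on the printable-ASCII domain.

-- ===== PORT A =====
def pvIsLower (ch : Char) : Bool := 'a' ≤ ch && ch ≤ 'z'
def pvIsUpper (ch : Char) : Bool := 'A' ≤ ch && ch ≤ 'Z'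

def pvShiftAlpha (ch : Char) (k : Int) : Char :=
  if pvIsLower ch then Char.ofNat ((PySem.Int.mod ((ch.toNat : Int) - 97 + k) 26).toNat + 97)
  else if pvIsUpper ch then Char.ofNat ((PySem.Int.mod ((ch.toNat : Int) - 65 + k) 26).toNat + 65)
  else ch

def pvClassCode (ch : Char) : String :=
  if pvIsLower ch then (if ch ≤ 'm' then "l1" else "l2")
  else if pvIsUpper ch then (if ch ≤ 'M' then "u1" else "u2")
  else "."

def encrypt_text_with_meta (text : String) (shift1 : Int) (shift2 : Int) : String × List String :=
  let s1 := PySem.Int.mod shift1 26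
  let s2 := PySem.Int.mod shift2 26
  let r := text.toList.foldl (fun (acc : List Char × List String) ch =>
    let code := pvClassCode ch
    let enc :=
      if code = "l1" then pvShiftAlpha ch (PySem.Int.mod (s1 * s2) 26)
      else if code = "l2" then pvShiftAlpha ch (PySem.Int.mod (-(s1 + s2)) 26)
      else if code = "u1" then pvShiftAlpha ch (-s1)
      else if code = "u2" then pvShiftAlpha ch (PySem.Int.mod (s2 * s2) 26)
      else ch
    (acc.1 ++ [enc], acc.2 ++ [code])) ([], [])
  (String.mk r.1, r.2)

-- ===== PORT B =====
def pvBCodeOf (c : Char) : String :=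
  if pvIsLower c then (if c ≤ 'm' then "l1" else "l2")
  else if pvIsUpper c then (if c ≤ 'M' then "u1" else "u2")
  else "."

def pvBRepl (kl1 kl2 ku1 ku2 : Int) (c : Char) : Char :=
  let code := pvBCodeOf c
  if code = "l1" then Char.ofNat ((PySem.Int.mod ((c.toNat : Int) - 97 + kl1) 26).toNat + 97)
  else if code = "l2" then Char.ofNat ((PySem.Int.mod ((c.toNat : Int) - 97 + kl2) 26).toNat + 97)
  else if code = "u1" then Char.ofNat ((PySem.Int.mod ((c.toNat : Int) - 65 + ku1) 26).toNat + 65)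
  else if code = "u2" then Char.ofNat ((PySem.Int.mod ((c.toNat : Int) - 65 + ku2) 26).toNat + 65)
  else c

def encrypt_text_with_meta_alt (text : String) (shift1 : Int) (shift2 : Int) : String × List String :=
  let s1 := PySem.Int.mod shift1 26
  let s2 := PySem.Int.mod shift2 26
  let kl1 := PySem.Int.mod (s1 * s2) 26
  let kl2 := PySem.Int.mod (-(s1 + s2)) 26
  let ku1 := PySem.Int.mod (-s1) 26
  let ku2 := PySem.Int.mod (s2 * s2) 26
  -- dict comprehension over dict.fromkeys(text) (= PySem.List.dedup)
  let table : PySem.Dict Int Char :=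
    (PySem.List.dedup text.toList).foldl
      (fun d c => d.insert ((c.toNat : Int)) (pvBRepl kl1 kl2 ku1 ku2 c)) PySem.Dict.empty
  -- str.translate with an ord->char table: each char replaced by its table entry, kept if absent (exact for such a table)
  (String.mk (text.toList.map (fun c => (table.get? ((c.toNat : Int))).getD c)),
   text.toList.map pvBCodeOf)

-- ===== PRECONDITION & SPEC =====
def Spec_encrypt_text_with_meta (text : String) (shift1 : Int) (shift2 : Int) (out : String × List String) : Prop := out = encrypt_text_with_meta_alt text shift1 shift2
instance (text : String) (shift1 : Int) (shift2 : Int) (out : String × List String) : Decidable (Spec_encrypt_text_with_meta text shift1 shift2 out) := by unfold Spec_encrypt_text_with_meta; infer_instance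

-- ===== CLAIM (what is proved, stated in full; the proofs are below) =====
def Claim_equal_encrypt_text_with_meta : Prop := ∀ (text : String) (shift1 : Int) (shift2 : Int), Dom_encrypt_text_with_meta text shift1 shift2 → Spec_encrypt_text_with_meta text shift1 shift2 (encrypt_text_with_meta text shift1 shift2)

-- ===== LEMMAS AND PROOFS =====

-- A's loop appends one encrypted char and one code per character: it is a pair of maps.
theorem pvFoldl_pair_map {α β γ : Type} (g : α → β) (h : α → γ) (L : List α) (xs : List β) (ys : List γ) :
    L.foldl (fun (acc : List β × List γ) ch => (acc.1 ++ [g ch], acc.2 ++ [h ch])) (xs, ys)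
      = (xs ++ L.map g, ys ++ L.map h) := by
  induction L generalizing xs ys with
  | nil => simp
  | cons a L ih => simp [List.foldl_cons, ih]

-- Looking the built table up at a key of a listed char returns its replacement.
theorem pvTable_get (L : List Char) (f : Char → Char) (d0 : PySem.Dict Int Char) (c : Char) :
    ((L.foldl (fun d x => d.insert ((x.toNat : Int)) (f x)) d0).get? ((c.toNat : Int)))
      = if c ∈ L then some (f c) else d0.get? ((c.toNat : Int)) := by
  induction L generalizing d0 with
  | nil => simp
  | cons a L ih =>
    simp only [List.foldl_cons, ih, List.mem_cons]
    by_cases hL : c ∈ L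
    · simp [hL]
    · by_cases hca : c = a
      · subst hca; simp [hL, PySem.Dict.get?_insert_self]
      · have : ((c.toNat : Int)) ≠ ((a.toNat : Int)) := by
          simp only [ne_eq, Int.natCast_inj]
          intro h
          exact hca (Char.ext (UInt32.toNat_inj.mp h))
        simp [hL, hca, PySem.Dict.get?_insert_of_ne _ _ this]

-- Per-character agreement of the two replacement computations.
theorem pvRepl_eq (s1 s2 : Int) (c : Char) :
    pvBRepl (PySem.Int.mod (s1 * s2) 26) (PySem.Int.mod (-(s1 + s2)) 26)
            (PySem.Int.mod (-s1) 26) (PySem.Int.mod (s2 * s2) 26) c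
      = (if pvClassCode c = "l1" then pvShiftAlpha c (PySem.Int.mod (s1 * s2) 26)
         else if pvClassCode c = "l2" then pvShiftAlpha c (PySem.Int.mod (-(s1 + s2)) 26)
         else if pvClassCode c = "u1" then pvShiftAlpha c (-s1)
         else if pvClassCode c = "u2" then pvShiftAlpha c (PySem.Int.mod (s2 * s2) 26)
         else c) := by
  unfold pvBRepl pvBCodeOf pvClassCode pvShiftAlpha pvIsLower pvIsUpper
  by_cases hl : ('a' ≤ c ∧ c ≤ 'z')
  · by_cases hm : c ≤ 'm' <;> simp [hl.1, hl.2, hm]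
  · by_cases hu : ('A' ≤ c ∧ c ≤ 'Z')
    · have hnl : ¬ ('a' ≤ c && c ≤ 'z') = true := by simp; intro h1; by_contra h2; simp at h2; exact hl ⟨h1, h2⟩
      by_cases hM : c ≤ 'M' <;>
        simp [hnl, hu.1, hu.2, hM]
    · have hnl : ¬ ('a' ≤ c && c ≤ 'z') = true := by simp; intro h1; by_contra h2; simp at h2; exact hl ⟨h1, h2⟩
      have hnu : ¬ ('A' ≤ c && c ≤ 'Z') = true := by simp; intro h1; by_contra h2; simp at h2; exact hu ⟨h1, h2⟩
      simp [hnl, hnu]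

-- ===== VERDICT (by name: the statement is the Claim_ definition above) =====
theorem encrypt_text_with_meta_spec : Claim_equal_encrypt_text_with_meta := by
  intro text shift1 shift2 _
  unfold Spec_encrypt_text_with_meta encrypt_text_with_meta encrypt_text_with_meta_alt
  simp only [pvFoldl_pair_map, List.nil_append, pvTable_get]
  refine Prod.ext ?_ rfl
  refine congrArg String.mk (List.map_congr_left fun c hc => ?_)
  have hmem : c ∈ PySem.List.dedup text.toList := (PySem.List.mem_dedup _ _).2 hc
  rw [if_pos hmem, Option.getD_some, pvRepl_eq]
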